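-- pv_equiv track=rewrite | github.com/nudin10/coloured_graph | colour_algo.py | count_clash
-- ===== SOURCE A (Python) =====
-- from collections import Counter
-- from typing import Dict, List, Any
--
-- def count_clash(node: Any, eNode: Any) -> int:
--     # count how many panels of current node is a supervisor in other node
--     # also include clashes where a student share a supervisor in the same time slot
--     combined_list = node['sv'] + node['p'] + eNode['sv'] + eNode['p']
--     # Count unique occurrences using Counter
--     unique_occurrences = Counter(combined_list)
--     count = 0
--     for sv, occurence in unique_occurrences.items():
--         if occurence > 1:
--             count += occurence // 2
--     return count
-- ===== SOURCE B (Python) =====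
-- def count_clash(node, eNode):
--     # One streaming pass: pair up occurrences on the fly (every 2nd, 4th, ... sighting
--     # of an id is one clash) instead of building a full Counter and summing afterwards.
--     combined_list = node['sv'] + node['p'] + eNode['sv'] + eNode['p']
--     count = 0
--     seen = {}
--     for x in combined_list:
--         prev = seen.get(x, 0)
--         if prev % 2 == 1:
--             count += 1
--         seen[x] = prev + 1
--     return count
-- ===== Notes on version B (the rewrite author's own statement) =====
-- stated objective: alternative
-- what changed: Instead of building a full Counter and then summing occurrence//2 over its items in a second loop, B makes one streaming pass over the combined list, incrementing the count whenever the current element has been seen an odd number of times before (every 2nd, 4th, ... sighting is one clash).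
import Mathlib
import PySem

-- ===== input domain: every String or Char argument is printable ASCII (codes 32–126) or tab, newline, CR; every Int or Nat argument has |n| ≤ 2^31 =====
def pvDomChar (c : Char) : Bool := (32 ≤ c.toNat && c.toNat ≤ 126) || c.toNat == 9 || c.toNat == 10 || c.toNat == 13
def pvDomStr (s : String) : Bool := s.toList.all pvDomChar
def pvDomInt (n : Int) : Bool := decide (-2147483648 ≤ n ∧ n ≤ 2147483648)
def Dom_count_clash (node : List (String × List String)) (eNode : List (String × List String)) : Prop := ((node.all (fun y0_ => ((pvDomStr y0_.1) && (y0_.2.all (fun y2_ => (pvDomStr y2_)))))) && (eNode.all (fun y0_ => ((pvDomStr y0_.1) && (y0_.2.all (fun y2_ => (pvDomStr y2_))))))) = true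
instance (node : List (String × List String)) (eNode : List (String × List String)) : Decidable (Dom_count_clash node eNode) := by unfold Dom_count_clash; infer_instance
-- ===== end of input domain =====

-- B replaces A's two-phase Counter-then-sum with a single streaming pass that counts
-- every even-numbered sighting of an id as one clash (objective: alternative decomposition).

-- ===== PORT A =====
def count_clash (node : List (String × List String)) (eNode : List (String × List String)) : Int :=
  match (PySem.Dict.mk node).get? "sv", (PySem.Dict.mk node).get? "p",
        (PySem.Dict.mk eNode).get? "sv", (PySem.Dict.mk eNode).get? "p" with
  | some nsv, some np, some esv, some ep =>
      let combined_list := nsv ++ np ++ esv ++ ep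
      let unique_occurrences := PySem.Dict.counter combined_list
      unique_occurrences.items.foldl
        (fun count kv => if 1 < kv.2 then count + PySem.Int.floordiv kv.2 2 else count) 0
  | _, _, _, _ => 0  -- unreachable under Pre_ (Python raises KeyError)

-- ===== PORT B =====
-- one step of B's loop: bump the running count when this is an even-numbered sighting of x
def pvBStep (st : Int × PySem.Dict String Int) (x : String) : Int × PySem.Dict String Int :=
  let prev := st.2.getD x 0
  (if PySem.Int.mod prev 2 == 1 then st.1 + 1 else st.1, st.2.insert x (prev + 1))

def count_clash_alt (node : List (String × List String)) (eNode : List (String × List String)) : Int :=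
  match (PySem.Dict.mk node).get? "sv" with
  | none => 0  -- unreachable under Pre_ (Python raises KeyError)
  | some nsv =>
    match (PySem.Dict.mk node).get? "p" with
    | none => 0
    | some np =>
      match (PySem.Dict.mk eNode).get? "sv" with
      | none => 0
      | some esv =>
        match (PySem.Dict.mk eNode).get? "p" with
        | none => 0
        | some ep => ((nsv ++ np ++ esv ++ ep).foldl pvBStep (0, PySem.Dict.empty)).1

-- ===== PRECONDITION & SPEC =====
-- Pre_ excludes exactly the inputs where a dict lacks key "sv" or "p": Python A raises KeyError there.
def Pre_count_clash (node : List (String × List String)) (eNode : List (String × List String)) : Prop :=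
  ((PySem.Dict.mk node).get? "sv").isSome = true ∧ ((PySem.Dict.mk node).get? "p").isSome = true ∧
  ((PySem.Dict.mk eNode).get? "sv").isSome = true ∧ ((PySem.Dict.mk eNode).get? "p").isSome = true
instance (node : List (String × List String)) (eNode : List (String × List String)) : Decidable (Pre_count_clash node eNode) := by unfold Pre_count_clash; infer_instance

def pvWitness_count_clash : (List (String × List String)) × (List (String × List String)) :=
  ([("sv", ["a", "b"]), ("p", ["c"])], [("sv", ["a"]), ("p", ["b", "a"])])

def Spec_count_clash (node : List (String × List String)) (eNode : List (String × List String)) (out : Int) : Prop := out = count_clash_alt node eNode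
instance (node : List (String × List String)) (eNode : List (String × List String)) (out : Int) : Decidable (Spec_count_clash node eNode out) := by unfold Spec_count_clash; infer_instance

-- ===== CLAIM (what is proved, stated in full; the proofs are below) =====
def Claim_equal_count_clash : Prop := ∀ (node : List (String × List String)) (eNode : List (String × List String)), Dom_count_clash node eNode → Pre_count_clash node eNode → Spec_count_clash node eNode (count_clash node eNode)

-- ===== LEMMAS AND PROOFS =====

-- the common value both programs compute: pairs per distinct id, summed
def pvPairs (l : List String) : Nat :=
  ((PySem.Set.ofList l).map (fun k => l.count k / 2)).sum

lemma pv_foldA (l : List String) : ∀ (s : List String) (a : Int),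
    (s.map (fun k => (k, (l.count k : Int)))).foldl
      (fun count kv => if 1 < kv.2 then count + PySem.Int.floordiv kv.2 2 else count) a
    = a + ((s.map (fun k => l.count k / 2)).sum : Nat) := by
  intro s
  induction s with
  | nil => intro a; simp
  | cons k s ih =>
    intro a
    have h2 : ((2 : Nat) : Int) = 2 := by norm_num
    by_cases h : 1 < l.count k
    · have h1 : (1 : Int) < (l.count k : Int) := by exact_mod_cast h
      simp only [List.map_cons, List.foldl_cons, if_pos h1, ih, List.sum_cons]
      rw [← h2, PySem.Int.floordiv_natCast]
      push_cast
      ring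
    · have h0 : l.count k / 2 = 0 := by omega
      have h1 : ¬ (1 : Int) < (l.count k : Int) := by exact_mod_cast h
      simp only [List.map_cons, List.foldl_cons, if_neg h1, ih, List.sum_cons, h0]
      simp

lemma pv_A_eq (l : List String) :
    (PySem.Dict.counter l).items.foldl
      (fun count kv => if 1 < kv.2 then count + PySem.Int.floordiv kv.2 2 else count) 0
    = (pvPairs l : Int) := by
  rw [PySem.Dict.items_counter, pv_foldA]
  simp [pvPairs]

lemma pv_B_snd (l : List String) : ∀ st : Int × PySem.Dict String Int,
    (l.foldl pvBStep st).2 = l.foldl (fun d x => d.insert x (d.getD x 0 + 1)) st.2 := by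
  induction l with
  | nil => intro st; rfl
  | cons x l ih => intro st; simp only [List.foldl_cons, pvBStep]; exact ih _

lemma pv_sum_map_update (x : String) (f g : String → Nat) : ∀ (s : List String), s.Nodup → x ∈ s →
    (∀ y ∈ s, y ≠ x → f y = g y) → (s.map f).sum + g x = (s.map g).sum + f x := by
  intro s
  induction s with
  | nil => intro _ h; simp at h
  | cons y s ih =>
    intro hnd hx hfg
    rcases List.mem_cons.mp hx with h | h
    · subst h
      have : s.map f = s.map g := by
        apply List.map_congr_left
        intro z hz
        exact hfg z (List.mem_cons_of_mem _ hz) (fun hzx => (List.nodup_cons.mp hnd).1 (hzx ▸ hz))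
      simp [this]
      omega
    · have hyx : y ≠ x := fun h' => (List.nodup_cons.mp hnd).1 (h' ▸ h)
      have := ih (List.nodup_cons.mp hnd).2 h (fun z hz => hfg z (List.mem_cons_of_mem _ hz))
      simp only [List.map_cons, List.sum_cons, hfg y (List.mem_cons_self) hyx]
      omega

lemma pv_ofList_append (l : List String) (x : String) :
    PySem.Set.ofList (l ++ [x]) = PySem.Set.add (PySem.Set.ofList l) x := by
  simp [PySem.Set.ofList, List.foldl_append]

lemma pv_add_mem (l : List String) (x : String) (h : x ∈ l) :
    PySem.Set.add (PySem.Set.ofList l) x = PySem.Set.ofList l := by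
  simp only [PySem.Set.add]
  rw [if_pos]
  simpa using (PySem.Set.mem_ofList l x).2 h

lemma pv_add_not_mem (l : List String) (x : String) (h : ¬ x ∈ l) :
    PySem.Set.add (PySem.Set.ofList l) x = PySem.Set.ofList l ++ [x] := by
  simp only [PySem.Set.add]
  rw [if_neg]
  intro hc
  exact h ((PySem.Set.mem_ofList l x).1 (by simpa using hc))

lemma pv_count_ne (l : List String) (x y : String) (hyx : y ≠ x) :
    (l ++ [x]).count y = l.count y := by
  simp [List.count_append, List.count_singleton, if_neg (Ne.symm hyx)]

lemma pv_pairs_append (l : List String) (x : String) :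
    pvPairs (l ++ [x]) = pvPairs l + (if l.count x % 2 = 1 then 1 else 0) := by
  unfold pvPairs
  rw [pv_ofList_append]
  have hcx : (l ++ [x]).count x = l.count x + 1 := by
    simp [List.count_append]
  by_cases hx : x ∈ l
  · rw [pv_add_mem l x hx]
    have key := pv_sum_map_update x (fun k => (l ++ [x]).count k / 2) (fun k => l.count k / 2)
      (PySem.Set.ofList l) (PySem.Set.nodup_ofList l) ((PySem.Set.mem_ofList l x).2 hx)
      (fun y _ hyx => by show (l ++ [x]).count y / 2 = l.count y / 2; rw [pv_count_ne l x y hyx])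
    simp only at key
    rw [hcx] at key
    by_cases hodd : l.count x % 2 = 1
    · rw [if_pos hodd]
      omega
    · rw [if_neg hodd]
      omega
  · rw [pv_add_not_mem l x hx]
    have h0 : l.count x = 0 := List.count_eq_zero.mpr hx
    have heq : (PySem.Set.ofList l).map (fun k => (l ++ [x]).count k / 2)
         = (PySem.Set.ofList l).map (fun k => l.count k / 2) := by
      apply List.map_congr_left
      intro y hy
      have hyx : y ≠ x := fun h' => hx (h' ▸ ((PySem.Set.mem_ofList l y).1 hy))
      rw [pv_count_ne l x y hyx]
    rw [List.map_append, List.sum_append, heq]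
    simp only [List.map_cons, List.map_nil, List.sum_cons, List.sum_nil, hcx, h0]
    simp

lemma pv_B_eq (l : List String) :
    (l.foldl pvBStep ((0 : Int), (PySem.Dict.empty : PySem.Dict String Int))).1 = (pvPairs l : Int) := by
  induction l using List.reverseRecOn with
  | nil => simp [pvPairs, PySem.Set.ofList, PySem.Set.empty]
  | append_singleton l x ih =>
    rw [List.foldl_append, List.foldl_cons, List.foldl_nil]
    have hsnd : (l.foldl pvBStep ((0 : Int), (PySem.Dict.empty : PySem.Dict String Int))).2.getD x 0
        = (l.count x : Int) := by
      rw [pv_B_snd, PySem.Dict.getD_foldl_insert_add_one]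
      simp [PySem.Dict.empty, PySem.Dict.getD, PySem.Dict.get?]
    have h2 : ((2 : Nat) : Int) = 2 := by norm_num
    simp only [pvBStep, hsnd, pv_pairs_append, ih]
    rw [← h2, PySem.Int.mod_natCast]
    by_cases hodd : l.count x % 2 = 1
    · simp [hodd]
    · have : l.count x % 2 = 0 := by omega
      simp [this]

-- ===== VERDICT (by name: the statement is the Claim_ definition above) =====
theorem count_clash_spec : Claim_equal_count_clash := by
  intro node eNode _ hpre
  obtain ⟨h1, h2, h3, h4⟩ := hpre
  obtain ⟨nsv, e1⟩ := Option.isSome_iff_exists.mp h1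
  obtain ⟨np, e2⟩ := Option.isSome_iff_exists.mp h2
  obtain ⟨esv, e3⟩ := Option.isSome_iff_exists.mp h3
  obtain ⟨ep, e4⟩ := Option.isSome_iff_exists.mp h4
  unfold Spec_count_clash count_clash count_clash_alt
  rw [e1, e2, e3, e4]
  simp only
  rw [pv_A_eq, pv_B_eq]
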